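-- pv_equiv track=rewrite | github.com/JakeEhrlich/CXEMA | scripts/generate_test_vectors.py | generate_test_vector
-- ===== SOURCE A (Python) =====
-- def generate_test_vector(values: list[int], stability_ticks: int = 1, warmup_ticks: int = 0) -> str:
--     """Generate test vector with 'x' for ticks after transitions.
--
--     Args:
--         values: Output values (list of 0/1)
--         stability_ticks: Number of ticks after a transition to mark as don't care
--         warmup_ticks: Number of ticks at the start to mark as don't care
--     """
--     test = ['?'] * len(values)
--
--     # Mark warmup ticks as don't care
--     for i in range(min(warmup_ticks, len(values))):
--         test[i] = 'x'
--
--     # Mark ticks after transitions as don't care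
--     for i in range(1, len(values)):
--         if values[i] != values[i-1]:
--             # Mark this tick and the next (stability_ticks - 1) ticks as don't care
--             for j in range(stability_ticks):
--                 if i + j < len(values):
--                     test[i + j] = 'x'
--
--     return ''.join(test)
-- ===== SOURCE B (Python) =====
-- def generate_test_vector(values: list[int], stability_ticks: int = 1, warmup_ticks: int = 0) -> str:
--     """Single pass: a countdown of remaining don't-care ticks after the last transition."""
--     out = []
--     rem = 0
--     for i, v in enumerate(values):
--         if i > 0 and v != values[i - 1]:
--             rem = stability_ticks
--         out.append('x' if i < warmup_ticks or rem > 0 else '?')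
--         if rem > 0:
--             rem -= 1
--     return ''.join(out)
-- ===== Notes on version B (the rewrite author's own statement) =====
-- stated objective: faster
-- what changed: Replaces A's per-transition inner loop that re-marks up to stability_ticks positions (plus a separate warmup pass over a preallocated array) with a single left-to-right pass carrying a countdown of remaining don't-care ticks since the last transition.
import Mathlib
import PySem

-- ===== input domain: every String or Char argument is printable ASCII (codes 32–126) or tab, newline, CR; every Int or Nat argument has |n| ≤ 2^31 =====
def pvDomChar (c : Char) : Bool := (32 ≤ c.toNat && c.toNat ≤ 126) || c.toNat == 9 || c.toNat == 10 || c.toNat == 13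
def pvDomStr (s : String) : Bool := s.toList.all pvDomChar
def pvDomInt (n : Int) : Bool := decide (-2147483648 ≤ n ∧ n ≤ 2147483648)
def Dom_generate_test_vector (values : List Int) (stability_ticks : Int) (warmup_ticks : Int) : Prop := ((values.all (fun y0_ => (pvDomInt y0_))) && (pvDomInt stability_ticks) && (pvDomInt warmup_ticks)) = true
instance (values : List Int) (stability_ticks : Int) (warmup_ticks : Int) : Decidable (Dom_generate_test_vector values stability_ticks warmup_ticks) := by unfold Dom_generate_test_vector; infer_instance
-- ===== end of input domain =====

-- B replaces A's per-transition inner marking loop by a single pass carrying a countdown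
-- of remaining don't-care ticks since the last transition.

-- ===== PORT A =====
def generate_test_vector (values : List Int) (stability_ticks : Int) (warmup_ticks : Int) : String :=
  let n : Int := values.length
  let test0 := List.replicate values.length '?'
  let test1 := (PySem.List.pyRange 0 (min warmup_ticks n) 1).foldl
      (fun t i => t.set i.toNat 'x') test0
  let test2 := (PySem.List.pyRange 1 n 1).foldl
      (fun t i =>
        if PySem.List.pyGet? values i ≠ PySem.List.pyGet? values (i - 1) then
          (PySem.List.pyRange 0 stability_ticks 1).foldl
            (fun t j => if i + j < n then t.set (i + j).toNat 'x' else t) t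
        else t) test1
  String.ofList test2

-- ===== PORT B =====
-- single pass: `rem` = remaining don't-care ticks from the last transition
def gtvGo (stability_ticks warmup_ticks : Int) (i rem : Int) (prev : Option Int) : List Int → List Char
  | [] => []
  | v :: vs =>
    let rem1 : Int := match prev with
      | some p => if v ≠ p then stability_ticks else rem
      | none => rem
    let c : Char := if i < warmup_ticks ∨ 0 < rem1 then 'x' else '?'
    let rem2 : Int := if 0 < rem1 then rem1 - 1 else rem1
    c :: gtvGo stability_ticks warmup_ticks (i + 1) rem2 (some v) vs

def generate_test_vector_alt (values : List Int) (stability_ticks : Int) (warmup_ticks : Int) : String :=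
  String.ofList (gtvGo stability_ticks warmup_ticks 0 0 none values)

-- ===== PRECONDITION & SPEC =====
def Spec_generate_test_vector (values : List Int) (stability_ticks : Int) (warmup_ticks : Int) (out : String) : Prop := out = generate_test_vector_alt values stability_ticks warmup_ticks
instance (values : List Int) (stability_ticks : Int) (warmup_ticks : Int) (out : String) : Decidable (Spec_generate_test_vector values stability_ticks warmup_ticks out) := by unfold Spec_generate_test_vector; infer_instance

-- ===== CLAIM (what is proved, stated in full; the proofs are below) =====
def Claim_equal_generate_test_vector : Prop := ∀ (values : List Int) (stability_ticks : Int) (warmup_ticks : Int), Dom_generate_test_vector values stability_ticks warmup_ticks → Spec_generate_test_vector values stability_ticks warmup_ticks (generate_test_vector values stability_ticks warmup_ticks)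

-- ===== LEMMAS AND PROOFS =====

-- "there is a transition at position t of the suffix vs" (t = 0 compares with prev)
def transB (prev : Option Int) (vs : List Int) (t : Nat) : Bool :=
  match t, prev with
  | 0, some p => vs[0]? != some p
  | 0, none => false
  | t' + 1, _ => vs[t' + 1]? != vs[t']?

-- position k of the suffix is marked 'x'
def markB (st warm rem i : Int) (prev : Option Int) (vs : List Int) (k : Nat) : Bool :=
  decide (i + k < warm) || decide ((k : Int) < rem) ||
    (List.range vs.length).any (fun t => transB prev vs t && decide (t ≤ k ∧ (k : Int) < t + st))

lemma transB_cons (prev : Option Int) (v : Int) (vs : List Int) (t : Nat) :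
    transB prev (v :: vs) (t + 1) = transB (some v) vs t := by
  cases t with
  | zero => simp [transB]
  | succ t' => simp [transB]

lemma r1_eq (rem st v : Int) (prev : Option Int) (vs : List Int) (r1 : Int)
    (hr1 : r1 = match prev with | some p => if v ≠ p then st else rem | none => rem) :
    r1 = if transB prev (v :: vs) 0 = true then st else rem := by
  cases prev with
  | none => simpa [transB] using hr1
  | some p =>
    rw [hr1]
    by_cases h : v = p <;> simp [transB, h]

lemma markB_succ (st warm rem i : Int) (prev : Option Int) (v : Int) (vs : List Int) (k : Nat)
    (hr : rem ≤ max st 0) (r1 : Int)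
    (hr1 : r1 = match prev with | some p => if v ≠ p then st else rem | none => rem) :
    markB st warm rem i prev (v :: vs) (k + 1) =
      markB st warm (if 0 < r1 then r1 - 1 else r1) (i + 1) (some v) vs k := by
  have hre := r1_eq rem st v prev vs r1 hr1
  rw [Bool.eq_iff_iff]
  simp only [markB, List.any_eq_true, List.mem_range, Bool.or_eq_true, Bool.and_eq_true,
    decide_eq_true_eq, List.length_cons]
  constructor
  · rintro ((hw | hrem) | ⟨t, ht, htr, hle, hlt⟩)
    · left; left; push_cast at hw ⊢; omega
    · left; right
      push_cast at hrem
      split at hre <;> split <;> omega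
    · cases t with
      | zero =>
        left; right
        rw [hre, if_pos htr]
        push_cast at hlt
        split <;> omega
      | succ t' =>
        right
        exact ⟨t', by omega, by rwa [transB_cons] at htr, by omega, by push_cast at hlt ⊢; omega⟩
  · rintro ((hw | hrem) | ⟨t, ht, htr, hle, hlt⟩)
    · left; left; push_cast at hw ⊢; omega
    · by_cases h0 : transB prev (v :: vs) 0 = true
      · rw [if_pos h0] at hre
        right
        refine ⟨0, by omega, h0, by omega, ?_⟩
        push_cast
        subst hre
        split at hrem <;> omega
      · rw [if_neg h0] at hre
        left; right
        push_cast
        subst hre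
        split at hrem <;> omega
    · right
      exact ⟨t + 1, by omega, by rwa [transB_cons], by omega, by push_cast at hlt ⊢; omega⟩

lemma markB_zero (st warm rem i : Int) (prev : Option Int) (v : Int) (vs : List Int)
    (hr : rem ≤ max st 0) (r1 : Int)
    (hr1 : r1 = match prev with | some p => if v ≠ p then st else rem | none => rem) :
    (markB st warm rem i prev (v :: vs) 0 = true) ↔ (i < warm ∨ 0 < r1) := by
  have hre := r1_eq rem st v prev vs r1 hr1
  simp only [markB, List.any_eq_true, List.mem_range, Bool.or_eq_true, Bool.and_eq_true,
    decide_eq_true_eq, List.length_cons]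
  constructor
  · rintro ((hw | hrem) | ⟨t, ht, htr, hle, hlt⟩)
    · left; push_cast at hw; omega
    · right; push_cast at hrem; split at hre <;> omega
    · interval_cases t
      right
      rw [hre, if_pos htr]
      push_cast at hlt; omega
  · rintro (hw | hpos)
    · left; left; push_cast; omega
    · by_cases h0 : transB prev (v :: vs) 0 = true
      · rw [if_pos h0] at hre
        right
        exact ⟨0, by omega, h0, by omega, by push_cast; omega⟩
      · rw [if_neg h0] at hre
        left; right
        push_cast; omega

lemma gtvGo_eq (st warm : Int) : ∀ (vs : List Int) (i rem : Int) (prev : Option Int),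
    rem ≤ max st 0 →
    gtvGo st warm i rem prev vs
      = (List.range vs.length).map (fun k => if markB st warm rem i prev vs k then 'x' else '?') := by
  intro vs
  induction vs with
  | nil => intro i rem prev _; simp [gtvGo]
  | cons v vs ih =>
    intro i rem prev hr
    set r1 : Int := (match prev with | some p => if v ≠ p then st else rem | none => rem) with hr1
    have hr2 : (if 0 < r1 then r1 - 1 else r1) ≤ max st 0 := by
      have := r1_eq rem st v prev vs r1 hr1
      split at this <;> split <;> omega
    show (if i < warm ∨ 0 < r1 then 'x' else '?') :: gtvGo st warm (i + 1) (if 0 < r1 then r1 - 1 else r1) (some v) vs = _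
    rw [ih (i + 1) _ (some v) hr2]
    rw [List.length_cons, List.range_succ_eq_map, List.map_cons, List.map_map]
    congr 1
    · have h0 := markB_zero st warm rem i prev v vs hr r1 hr1
      by_cases h : i < warm ∨ 0 < r1
      · rw [if_pos h, if_pos (h0.mpr h)]
      · rw [if_neg h, if_neg (fun hh => h (h0.mp hh))]
    · apply List.map_congr_left
      intro k _
      simp only [Function.comp]
      rw [markB_succ st warm rem i prev v vs k hr r1 hr1]

lemma set_get? (l : List Char) (i : Nat) (a : Char) (k : Nat) :
    (l.set i a)[k]? = if i = k ∧ i < l.length then some a else l[k]? := by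
  rw [List.getElem?_set]
  split <;> split_ifs <;> simp_all <;> omega

lemma foldl_cset_get? {α : Type} (c : α → Prop) [DecidablePred c] (f : α → Nat) :
    ∀ (js : List α) (l : List Char) (k : Nat),
    (js.foldl (fun t j => if c j then t.set (f j) 'x' else t) l)[k]? =
      if (∃ j ∈ js, c j ∧ f j = k) ∧ k < l.length then some 'x' else l[k]? := by
  intro js
  induction js with
  | nil => intro l k; simp
  | cons j js ih =>
    intro l k
    simp only [List.foldl_cons]
    rw [ih]
    by_cases hc : c j
    · simp only [if_pos hc, List.length_set, set_get?]
      by_cases hf : f j = k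
      · by_cases hk : k < l.length
        · simp [hf, hk, hc]
        · simp [hf, hk, hc]
      · split_ifs with h1 h2 <;> simp_all <;> tauto
    · simp only [if_neg hc]
      split_ifs with h1 h2 <;> simp_all <;> tauto

lemma foldl_cset_length {α : Type} (c : α → Prop) [DecidablePred c] (f : α → Nat) :
    ∀ (js : List α) (l : List Char),
    (js.foldl (fun t j => if c j then t.set (f j) 'x' else t) l).length = l.length := by
  intro js
  induction js with
  | nil => intro l; simp
  | cons j js ih => intro l; simp only [List.foldl_cons]; rw [ih]; split <;> simp

lemma foldl_set_get? (js : List Int) (l : List Char) (k : Nat) :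
    (js.foldl (fun t i => t.set i.toNat 'x') l)[k]? =
      if (∃ j ∈ js, j.toNat = k) ∧ k < l.length then some 'x' else l[k]? := by
  have h := foldl_cset_get? (fun _ : Int => True) Int.toNat js l k
  simpa using h

lemma foldl_set_length (js : List Int) (l : List Char) :
    (js.foldl (fun t i => t.set i.toNat 'x') l).length = l.length := by
  have h := foldl_cset_length (fun _ : Int => True) Int.toNat js l
  simpa using h

lemma ite_ite_or (p q : Prop) [Decidable p] [Decidable q] (a b : Option Char) :
    (if p then a else if q then a else b) = if p ∨ q then a else b := by
  by_cases hp : p <;> by_cases hq : q <;> simp [hp, hq]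

lemma outerA (values : List Int) (st : Int) :
    ∀ (is : List Int) (l : List Char) (k : Nat),
    ((is.foldl (fun t i =>
        if PySem.List.pyGet? values i ≠ PySem.List.pyGet? values (i - 1) then
          (PySem.List.pyRange 0 st 1).foldl
            (fun t j => if i + j < (values.length : Int) then t.set (i + j).toNat 'x' else t) t
        else t) l)[k]?) =
      if (∃ i ∈ is, PySem.List.pyGet? values i ≠ PySem.List.pyGet? values (i - 1) ∧
            ∃ j ∈ PySem.List.pyRange 0 st 1, i + j < (values.length : Int) ∧ (i + j).toNat = k)
          ∧ k < l.length then some 'x' else l[k]? := by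
  intro is
  induction is with
  | nil => intro l k; simp
  | cons i is ih =>
    intro l k
    simp only [List.foldl_cons]
    rw [ih]
    by_cases hc : PySem.List.pyGet? values i ≠ PySem.List.pyGet? values (i - 1)
    · have hlen := foldl_cset_length (fun j => i + j < (values.length : Int)) (fun j => (i + j).toNat) (PySem.List.pyRange 0 st 1) l
      have hget := foldl_cset_get? (fun j => i + j < (values.length : Int)) (fun j => (i + j).toNat) (PySem.List.pyRange 0 st 1) l k
      simp only [if_pos hc, hlen, hget, List.exists_mem_cons_iff]
      rw [ite_ite_or]
      refine if_congr ?_ rfl rfl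
      constructor
      · rintro (⟨h, hK⟩ | ⟨h, hK⟩)
        · exact ⟨Or.inr h, hK⟩
        · exact ⟨Or.inl ⟨hc, h⟩, hK⟩
      · rintro ⟨h | h, hK⟩
        · exact Or.inr ⟨h.2, hK⟩
        · exact Or.inl ⟨h, hK⟩
    · simp only [if_neg hc, List.exists_mem_cons_iff]
      refine if_congr ?_ rfl rfl
      constructor
      · rintro ⟨h, hK⟩; exact ⟨Or.inr h, hK⟩
      · rintro ⟨h | h, hK⟩
        · exact absurd h.1 (by simpa using hc)
        · exact ⟨h, hK⟩

lemma trans_iff (values : List Int) (st : Int) (k : Nat) (hk : k < values.length) :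
    (∃ i ∈ PySem.List.pyRange 1 (values.length : Int) 1,
        PySem.List.pyGet? values i ≠ PySem.List.pyGet? values (i - 1) ∧
        ∃ j ∈ PySem.List.pyRange 0 st 1, i + j < (values.length : Int) ∧ (i + j).toNat = k)
      ↔ ((List.range values.length).any
          (fun t => transB none values t && decide (t ≤ k ∧ (k : Int) < t + st)) = true) := by
  simp only [PySem.List.mem_pyRange_one, List.any_eq_true, List.mem_range, Bool.and_eq_true,
    decide_eq_true_eq]
  constructor
  · rintro ⟨i, ⟨hi1, hi2⟩, hne, j, ⟨hj0, hjst⟩, hjn, hjk⟩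
    obtain ⟨t', ht'⟩ : ∃ t', i.toNat = t' + 1 := ⟨i.toNat - 1, by omega⟩
    refine ⟨t' + 1, by omega, ?_, by omega, by push_cast; omega⟩
    have e1 : PySem.List.pyGet? values i = values[t' + 1]? := by
      rw [PySem.List.pyGet?_of_nonneg values (show (0:Int) ≤ i by omega), ht']
    have e2 : PySem.List.pyGet? values (i - 1) = values[t']? := by
      rw [PySem.List.pyGet?_of_nonneg values (show (0:Int) ≤ i - 1 by omega)]
      congr 1
      omega
    simp only [transB, bne_iff_ne, ne_eq]
    rw [e1, e2] at hne
    exact hne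
  · rintro ⟨t, htn, htr, hle, hlt⟩
    cases t with
    | zero => simp [transB] at htr
    | succ t' =>
      refine ⟨((t' + 1 : Nat) : Int), ⟨by omega, by omega⟩, ?_, (k : Int) - (t' + 1),
        ⟨by omega, by push_cast at hlt ⊢; omega⟩, by omega, by omega⟩
      have e1 : PySem.List.pyGet? values ((t' + 1 : Nat) : Int) = values[t' + 1]? :=
        PySem.List.pyGet?_natCast values (t' + 1)
      have e2 : PySem.List.pyGet? values (((t' + 1 : Nat) : Int) - 1) = values[t']? := by
        rw [PySem.List.pyGet?_of_nonneg values (show (0:Int) ≤ ((t' + 1 : Nat) : Int) - 1 by omega)]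
        congr 1
        omega
      rw [e1, e2]
      simpa only [transB, bne_iff_ne, ne_eq] using htr

lemma warm_iff (warm : Int) (n k : Nat) (hk : k < n) :
    (∃ i ∈ PySem.List.pyRange 0 (min warm (n : Int)) 1, i.toNat = k) ↔ ((k : Int) < warm) := by
  simp only [PySem.List.mem_pyRange_one]
  constructor
  · rintro ⟨i, ⟨hi0, hi1⟩, hik⟩; omega
  · intro h; exact ⟨(k : Int), ⟨by omega, by omega⟩, by omega⟩

lemma A_eq (values : List Int) (st warm : Int) :
    generate_test_vector values st warm
      = String.ofList ((List.range values.length).map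
          (fun k => if markB st warm 0 0 none values k then 'x' else '?')) := by
  unfold generate_test_vector
  apply congrArg String.ofList
  apply List.ext_getElem?
  intro k
  rw [outerA, foldl_set_length, List.length_replicate, foldl_set_get?, List.length_replicate]
  by_cases hk : k < values.length
  · have hrepl : (List.replicate values.length '?')[k]? = some '?' := by simp [hk]
    have hmap : ((List.range values.length).map
        (fun k => if markB st warm 0 0 none values k then 'x' else '?'))[k]?
        = some (if markB st warm 0 0 none values k then 'x' else '?') := by
      simp [hk]
    rw [hrepl, hmap]
    simp only [hk, and_true]
    rw [ite_ite_or, apply_ite (fun c : Char => some c)]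
    refine if_congr ?_ rfl rfl
    have hT := trans_iff values st k hk
    have hW := warm_iff warm values.length k hk
    simp only [markB, Bool.or_eq_true, decide_eq_true_eq]
    constructor
    · rintro (hTt | hWt)
      · exact Or.inr (hT.mp hTt)
      · left; left; have := hW.mp hWt; omega
    · rintro ((h1 | h2) | hA)
      · right; exact hW.mpr (by omega)
      · exact absurd h2 (by omega)
      · exact Or.inl (hT.mpr hA)
  · rw [if_neg (by tauto), if_neg (by tauto), List.getElem?_replicate, if_neg hk,
      List.getElem?_eq_none (by simp; omega)]

-- ===== VERDICT (by name: the statement is the Claim_ definition above) =====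
theorem generate_test_vector_spec : Claim_equal_generate_test_vector := by
  intro values st warm _
  unfold Spec_generate_test_vector generate_test_vector_alt
  rw [A_eq, gtvGo_eq st warm values 0 0 none (by simp)]
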